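-- pv_equiv track=rewrite | github.com/SebastianKrog/BioinformaticsContest2021 | isoform_matching/isoform_matching.py | calc_read
-- ===== SOURCE A (Python) =====
-- def calc_read(read, delta, delta_fixed_isoforms):
--     matches_found = []
--     for iso_n, delta_isoform in enumerate(delta_fixed_isoforms):
--         isoform_fit = True
--         for i, part in enumerate(read):
--             if i == 0:
--                 truncate_allowed = "left"
--             elif i == (len(read) - 1):
--                 truncate_allowed = "right"
--             else:
--                 truncate_allowed = False
--             part_fit = False
--             for lb, ub in delta_isoform:
--                 if truncate_allowed == "left":
--                     if part[0] >= lb and abs(ub - delta - part[1]) <= delta: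
--                         # it fits
--                         part_fit = True
--                         break
--                 elif truncate_allowed == "right":
--                     if part[1] <= ub and abs(lb + delta - part[0]) <= delta:
--                         part_fit = True
--                         break
--                 else:
--                     if abs(ub - delta - part[1]) <= delta and abs(lb + delta - part[0]) <= delta:
--                         part_fit = True
--                         break
--
--             if not part_fit:
--                 # bad isoform
--                 isoform_fit = False
--                 break
--         if isoform_fit:
--             matches_found.append(iso_n)
--     if len(matches_found) == 0:
--         return -1, 0
--     else:
--        return min(matches_found), len(matches_found)
-- ===== SOURCE B (Python) =====
-- def _part_ok(i, part, lb, ub, delta, n):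
--     p0, p1 = part
--     if i == 0:
--         return p0 >= lb and abs(ub - delta - p1) <= delta
--     if i == n - 1:
--         return p1 <= ub and abs(lb + delta - p0) <= delta
--     return abs(ub - delta - p1) <= delta and abs(lb + delta - p0) <= delta
--
--
-- def calc_read(read, delta, delta_fixed_isoforms):
--     n = len(read)
--     first = -1
--     count = 0
--     for iso_n, intervals in enumerate(delta_fixed_isoforms):
--         fit = [False] * n
--         for lb, ub in intervals:
--             fit = [q[0] or _part_ok(i, q[1], lb, ub, delta, n)
--                    for i, q in enumerate(zip(fit, read))]
--         if all(fit):
--             count += 1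
--             if first < 0:
--                 first = iso_n
--     return first, count
-- ===== Notes on version B (the rewrite author's own statement) =====
-- stated objective: alternative
-- what changed: Inverted the loop nest: B sweeps each isoform's interval list once, OR-ing a per-part fit mask (instead of rescanning the intervals for every part with break flags), and folds (first, count) directly instead of collecting a match list and taking min/len.
import Mathlib
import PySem

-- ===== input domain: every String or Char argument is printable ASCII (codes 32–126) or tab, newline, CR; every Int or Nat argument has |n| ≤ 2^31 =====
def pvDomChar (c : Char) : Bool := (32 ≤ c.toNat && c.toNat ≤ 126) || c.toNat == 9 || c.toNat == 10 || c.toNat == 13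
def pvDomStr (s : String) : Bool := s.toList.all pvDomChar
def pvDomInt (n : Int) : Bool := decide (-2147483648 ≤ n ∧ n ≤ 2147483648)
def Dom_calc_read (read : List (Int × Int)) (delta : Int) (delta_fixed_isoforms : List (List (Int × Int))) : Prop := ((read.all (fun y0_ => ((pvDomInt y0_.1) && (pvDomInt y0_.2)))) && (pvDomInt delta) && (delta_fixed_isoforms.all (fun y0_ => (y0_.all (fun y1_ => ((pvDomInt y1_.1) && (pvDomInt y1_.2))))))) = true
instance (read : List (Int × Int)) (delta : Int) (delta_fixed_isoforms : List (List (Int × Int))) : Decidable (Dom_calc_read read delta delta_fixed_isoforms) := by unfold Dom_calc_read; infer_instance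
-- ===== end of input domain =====

-- B inverts the loop nest (one sweep of each isoform's intervals OR-ing a per-part fit mask,
-- folding (first, count) directly instead of collecting a match list and taking min/len); same worst-case cost, alternative structure (no early breaks).

-- ===== PORT A =====
-- truncate_allowed encoded as Int: 0 = "left", 1 = "right", 2 = False
def pvIvFitA (tr delta : Int) (part iv : Int × Int) : Bool :=
  if tr = 0 then decide (part.1 ≥ iv.1 ∧ |iv.2 - delta - part.2| ≤ delta)
  else if tr = 1 then decide (part.2 ≤ iv.2 ∧ |iv.1 + delta - part.1| ≤ delta)
  else decide (|iv.2 - delta - part.2| ≤ delta ∧ |iv.1 + delta - part.1| ≤ delta)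

def calc_read (read : List (Int × Int)) (delta : Int) (delta_fixed_isoforms : List (List (Int × Int))) : Int × Int :=
  let matches_found := (PySem.List.enumerate delta_fixed_isoforms 0).foldl
    (fun ms p =>
      let isoform_fit := (PySem.List.enumerate read 0).all (fun q =>
        let tr : Int := if q.1 = 0 then 0 else if q.1 = (read.length : Int) - 1 then 1 else 2
        p.2.any (fun iv => pvIvFitA tr delta q.2 iv))
      if isoform_fit then ms ++ [p.1] else ms) []
  if matches_found.length = 0 then (-1, 0)
  else ((PySem.List.min? matches_found (fun x => x)).getD 0, (matches_found.length : Int))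

-- ===== PORT B =====
def pvPartOkB (n delta i : Int) (part : Int × Int) (lb ub : Int) : Bool :=
  if i = 0 then decide (part.1 ≥ lb ∧ |ub - delta - part.2| ≤ delta)
  else if i = n - 1 then decide (part.2 ≤ ub ∧ |lb + delta - part.1| ≤ delta)
  else decide (|ub - delta - part.2| ≤ delta ∧ |lb + delta - part.1| ≤ delta)

def calc_read_alt (read : List (Int × Int)) (delta : Int) (delta_fixed_isoforms : List (List (Int × Int))) : Int × Int :=
  let n : Int := (read.length : Int)
  (PySem.List.enumerate delta_fixed_isoforms 0).foldl
    (fun acc p =>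
      let fit := p.2.foldl
        (fun fit iv =>
          (PySem.List.enumerate (fit.zip read) 0).map
            (fun q => q.2.1 || pvPartOkB n delta q.1 q.2.2 iv.1 iv.2))
        (List.replicate read.length false)
      if fit.all id then ((if acc.1 < 0 then p.1 else acc.1), acc.2 + 1) else acc)
    (-1, 0)

-- ===== PRECONDITION & SPEC =====
def Spec_calc_read (read : List (Int × Int)) (delta : Int) (delta_fixed_isoforms : List (List (Int × Int))) (out : Int × Int) : Prop := out = calc_read_alt read delta delta_fixed_isoforms
instance (read : List (Int × Int)) (delta : Int) (delta_fixed_isoforms : List (List (Int × Int))) (out : Int × Int) : Decidable (Spec_calc_read read delta delta_fixed_isoforms out) := by unfold Spec_calc_read; infer_instance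

-- ===== CLAIM (what is proved, stated in full; the proofs are below) =====
def Claim_equal_calc_read : Prop := ∀ (read : List (Int × Int)) (delta : Int) (delta_fixed_isoforms : List (List (Int × Int))), Dom_calc_read read delta delta_fixed_isoforms → Spec_calc_read read delta delta_fixed_isoforms (calc_read read delta delta_fixed_isoforms)

-- ===== LEMMAS AND PROOFS =====

-- the two per-part predicates agree once A's truncate code is computed from the index
theorem pvFit_agree (n delta i : Int) (part iv : Int × Int) :
    pvIvFitA (if i = 0 then 0 else if i = n - 1 then 1 else 2) delta part iv
      = pvPartOkB n delta i part iv.1 iv.2 := by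
  unfold pvIvFitA pvPartOkB
  split_ifs <;> simp_all

theorem pvStep_length (read : List (Int × Int)) (n delta : Int) (fit : List Bool) (iv : Int × Int) :
    ((PySem.List.enumerate (fit.zip read) 0).map
      (fun q => q.2.1 || pvPartOkB n delta q.1 q.2.2 iv.1 iv.2)).length
      = min fit.length read.length := by
  simp [PySem.List.length_enumerate]

theorem pvStep_getElem (read : List (Int × Int)) (n delta : Int) (fit : List Bool) (iv : Int × Int)
    (hf : fit.length = read.length) (k : Nat) (hk : k < read.length)
    (hk' : k < ((PySem.List.enumerate (fit.zip read) 0).map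
      (fun q => q.2.1 || pvPartOkB n delta q.1 q.2.2 iv.1 iv.2)).length) :
    ((PySem.List.enumerate (fit.zip read) 0).map
      (fun q => q.2.1 || pvPartOkB n delta q.1 q.2.2 iv.1 iv.2))[k]
      = (fit[k]'(by omega) || pvPartOkB n delta k read[k] iv.1 iv.2) := by
  simp [List.getElem_map, PySem.List.getElem_enumerate, List.getElem_zip]

theorem pvFold_length (read : List (Int × Int)) (n delta : Int) (L : List (Int × Int))
    (fit0 : List Bool) (hf : fit0.length = read.length) :
    (L.foldl (fun fit iv =>
        (PySem.List.enumerate (fit.zip read) 0).map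
          (fun q => q.2.1 || pvPartOkB n delta q.1 q.2.2 iv.1 iv.2)) fit0).length
      = read.length := by
  induction L generalizing fit0 with
  | nil => simpa using hf
  | cons iv L ih =>
      simp only [List.foldl_cons]
      exact ih _ (by rw [pvStep_length]; omega)

theorem pvFold_getElem (read : List (Int × Int)) (n delta : Int) (L : List (Int × Int))
    (fit0 : List Bool) (hf : fit0.length = read.length) (k : Nat) (hk : k < read.length) (hk2 : _) :
    (L.foldl (fun fit iv =>
        (PySem.List.enumerate (fit.zip read) 0).map
          (fun q => q.2.1 || pvPartOkB n delta q.1 q.2.2 iv.1 iv.2)) fit0)[k]'hk2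
      = (fit0[k]'(by omega) || L.any (fun iv => pvPartOkB n delta k read[k] iv.1 iv.2)) := by
  induction L generalizing fit0 with
  | nil => simp
  | cons iv L ih =>
      simp only [List.foldl_cons]
      have hlen : ((PySem.List.enumerate (fit0.zip read) 0).map
          (fun q => q.2.1 || pvPartOkB n delta q.1 q.2.2 iv.1 iv.2)).length = read.length := by
        rw [pvStep_length]; omega
      rw [ih _ hlen (by rw [pvFold_length read n delta L _ hlen]; exact hk)]
      rw [pvStep_getElem read n delta fit0 iv hf k hk (by omega)]
      simp [Bool.or_assoc]

-- per-isoform equivalence: A's all-parts/any-interval scan equals B's accumulated fit mask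
theorem pvIso_eq (read : List (Int × Int)) (delta : Int) (L : List (Int × Int)) :
    ((PySem.List.enumerate read 0).all (fun q =>
        L.any (fun iv => pvIvFitA (if q.1 = 0 then 0 else if q.1 = (read.length : Int) - 1 then 1 else 2) delta q.2 iv)))
      = ((L.foldl (fun fit iv =>
          (PySem.List.enumerate (fit.zip read) 0).map
            (fun q => q.2.1 || pvPartOkB (read.length : Int) delta q.1 q.2.2 iv.1 iv.2))
          (List.replicate read.length false)).all id) := by
  have hrep : (List.replicate read.length false).length = read.length := by simp
  have hlen := pvFold_length read (read.length : Int) delta L _ hrep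
  rw [Bool.eq_iff_iff]
  simp only [List.all_eq_true]
  constructor
  · intro h x hx
    rcases List.mem_iff_getElem.mp hx with ⟨k, hk, hxk⟩
    have hk' : k < read.length := by omega
    rw [pvFold_getElem read _ delta L _ hrep k hk' hk] at hxk
    have hmem : ((k : Int), read[k]) ∈ PySem.List.enumerate read 0 := by
      rw [PySem.List.mem_enumerate_iff]; exact ⟨k, hk', by simp⟩
    have := h _ hmem
    simp only at this
    rw [funext (fun iv => pvFit_agree (read.length : Int) delta (k : Int) read[k] iv)] at this
    simp only [id, ← hxk, List.getElem_replicate, Bool.false_or]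
    exact this
  · intro h q hq
    rcases (PySem.List.mem_enumerate_iff _ _ _).mp hq with ⟨k, hk, rfl⟩
    have hx : (L.foldl (fun fit iv =>
          (PySem.List.enumerate (fit.zip read) 0).map
            (fun q => q.2.1 || pvPartOkB (read.length : Int) delta q.1 q.2.2 iv.1 iv.2))
          (List.replicate read.length false))[k]'(by omega) = true := by
      apply h
      exact List.mem_iff_getElem.mpr ⟨k, by omega, rfl⟩
    rw [pvFold_getElem read _ delta L _ hrep k hk (by omega)] at hx
    simp only [List.getElem_replicate, Bool.false_or] at hx
    simp only [zero_add]
    rw [funext (fun iv => pvFit_agree (read.length : Int) delta (k : Int) read[k] iv)]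
    exact hx

theorem pvFoldl_min_self (t : List Int) (k : Int) (h : ∀ y ∈ t, k ≤ y) :
    t.foldl min k = k := by
  induction t with
  | nil => rfl
  | cons a t ih =>
      simp only [List.foldl_cons, min_eq_left (h a (by simp))]
      exact ih (fun y hy => h y (by simp [hy]))

theorem pvFoldB_char {α : Type} (q : Int × α → Bool) (E : List (Int × α)) (f c : Int)
    (hpos : ∀ p ∈ E, 0 ≤ p.1) :
    E.foldl (fun acc p => if q p then ((if acc.1 < 0 then p.1 else acc.1), acc.2 + 1) else acc) (f, c)
      = ((if f < 0 then (((E.filter q).map (·.1)).headD f) else f),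
          c + ((E.filter q).length : Int)) := by
  induction E generalizing f c with
  | nil => split <;> simp
  | cons p E ih =>
      simp only [List.foldl_cons]
      by_cases hq : q p
      · rw [if_pos hq]
        rw [ih _ _ (fun x hx => hpos x (by simp [hx]))]
        have hp : 0 ≤ p.1 := hpos p (by simp)
        by_cases hf : f < 0
        · simp [hq, hf, not_lt.mpr hp]
          omega
        · simp [hq, hf]
          omega
      · rw [if_neg hq]
        rw [ih _ _ (fun x hx => hpos x (by simp [hx]))]
        simp [hq]

theorem pvFinal {A : Type} (E : List (Int × A)) (q : Int × A → Bool)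
    (hpw : ((E.filter q).map (fun x : Int × A => x.1)).Pairwise (· < ·)) :
    (if ([] ++ (E.filter q).map (fun x : Int × A => x.1)).length = 0 then ((-1 : Int), (0 : Int))
     else ((PySem.List.min? ([] ++ (E.filter q).map (fun x : Int × A => x.1)) (fun x => x)).getD 0,
           (([] ++ (E.filter q).map (fun x : Int × A => x.1)).length : Int)))
    = ((if (-1 : Int) < 0 then ((E.filter q).map (fun x : Int × A => x.1)).headD (-1) else (-1 : Int)),
       (0 : Int) + ((E.filter q).length : Int)) := by
  simp only [List.nil_append]
  have hlf : (E.filter q).length = ((E.filter q).map (fun x : Int × A => x.1)).length := by simp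
  rcases hms : (E.filter q).map (fun x : Int × A => x.1) with _ | ⟨k, t⟩
  · rw [hms] at hlf
    simp [hlf]
  · rw [hms] at hpw hlf
    have hmin : PySem.List.min? (k :: t) (fun x => x) = some k := by
      rw [PySem.List.min?_id_cons,
        pvFoldl_min_self t k (fun y hy => le_of_lt ((List.pairwise_cons.mp hpw).1 y hy))]
    simp [hmin, hlf]

-- ===== VERDICT (by name: the statement is the Claim_ definition above) =====
theorem calc_read_spec : Claim_equal_calc_read := by
  intro read delta isos _
  unfold Spec_calc_read calc_read calc_read_alt
  simp only []
  have hfun : (fun (acc : Int × Int) (p : Int × List (Int × Int)) =>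
        if (p.2.foldl (fun fit iv =>
            (PySem.List.enumerate (fit.zip read) 0).map
              (fun q => q.2.1 || pvPartOkB (read.length : Int) delta q.1 q.2.2 iv.1 iv.2))
            (List.replicate read.length false)).all id
        then ((if acc.1 < 0 then p.1 else acc.1), acc.2 + 1) else acc)
      = (fun acc p =>
        if ((PySem.List.enumerate read 0).all (fun q =>
            p.2.any (fun iv => pvIvFitA (if q.1 = 0 then 0 else if q.1 = (read.length : Int) - 1 then 1 else 2) delta q.2 iv)))
        then ((if acc.1 < 0 then p.1 else acc.1), acc.2 + 1) else acc) := by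
    funext acc p
    rw [pvIso_eq read delta p.2]
  rw [hfun]
  rw [pvFoldB_char _ _ _ _ (fun p hp => by
    rcases (PySem.List.mem_enumerate_iff _ _ _).mp hp with ⟨k, hk, rfl⟩
    simp)]
  rw [PySem.List.foldl_append_if]
  exact pvFinal _ _ (by rw [List.pairwise_map]; exact (PySem.List.pairwise_lt_enumerate isos 0).filter _)
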